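-- pv_equiv track=rewrite | github.com/cschell/LSTM_Experiments | trainer.py | calculateOutput
-- ===== SOURCE A (Python) =====
-- def calculateOutput(sequence):
--     sum = 0
--     inverse = 1
--     for char in sequence:
--       if char == '+':
--         sum += 1 * inverse
--       elif char == '-':
--         sum -= 1 * inverse
--       elif char == 'R':
--         sum = 0
--       elif char == 'I':
--         inverse *= -1
--     return sum
--
--     maxSequenceLength = len(sequence) * 2
--
--     out_list = ([0] * (maxSequenceLength + 1))
--     out_list[sum + maxSequenceLength / 2] = 1
--     return out_list
-- ===== SOURCE B (Python) =====
-- def calculateOutput(sequence):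
--     # two-phase: locate the position just after the last reset, then accumulate
--     # signed +/- only from that cutoff on, while tracking the sign flips globally
--     cutoff = 0
--     for i, ch in enumerate(sequence):
--         if ch == 'R':
--             cutoff = i + 1
--     total = 0
--     inverse = 1
--     for i, ch in enumerate(sequence):
--         if ch == 'I':
--             inverse = -inverse
--         elif i >= cutoff:
--             if ch == '+':
--                 total += inverse
--             elif ch == '-':
--                 total -= inverse
--     return total
-- ===== Notes on version B (the rewrite author's own statement) =====
-- stated objective: alternative
-- what changed: Replaces the single stateful accumulation with a reset branch by a two-phase scan: first find the index just after the last 'R', then accumulate signed +/- contributions only at or past that cutoff while advancing the sign-flip parity across the whole string.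
import Mathlib
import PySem

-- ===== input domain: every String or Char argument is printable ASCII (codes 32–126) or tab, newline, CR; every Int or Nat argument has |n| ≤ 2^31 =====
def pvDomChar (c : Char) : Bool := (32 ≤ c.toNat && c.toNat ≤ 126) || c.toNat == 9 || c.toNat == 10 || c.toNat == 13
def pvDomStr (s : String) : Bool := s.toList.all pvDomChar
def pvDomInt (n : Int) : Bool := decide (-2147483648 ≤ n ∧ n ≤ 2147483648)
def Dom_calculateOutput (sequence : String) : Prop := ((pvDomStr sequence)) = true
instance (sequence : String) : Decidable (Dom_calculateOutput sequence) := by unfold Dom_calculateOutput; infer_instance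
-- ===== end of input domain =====

-- B is an alternative two-phase decomposition (locate the last reset, then scoped signed accumulation); return value only, no side effects.

-- ===== PORT A =====
-- single stateful pass: running sum, reset on 'R', sign flip state on 'I'
def aStep (st : Int × Int) (c : Char) : Int × Int :=
  if c = '+' then (st.1 + 1 * st.2, st.2)
  else if c = '-' then (st.1 - 1 * st.2, st.2)
  else if c = 'R' then (0, st.2)
  else if c = 'I' then (st.1, st.2 * (-1))
  else st

def calculateOutput (sequence : String) : Int :=
  (sequence.toList.foldl aStep (0, 1)).1

-- ===== PORT B =====
-- phase 1: cutoff = index just after the last 'R' (0 if none)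
def bCut (e : List (Int × Char)) : Int :=
  e.foldl (fun cutoff p => if p.2 = 'R' then p.1 + 1 else cutoff) 0

-- phase 2: track sign parity over the whole string, accumulate only at/past cutoff
def bStep (cutoff : Int) (st : Int × Int) (p : Int × Char) : Int × Int :=
  if p.2 = 'I' then (st.1, -st.2)
  else if cutoff ≤ p.1 then
    if p.2 = '+' then (st.1 + st.2, st.2)
    else if p.2 = '-' then (st.1 - st.2, st.2)
    else st
  else st

def calculateOutput_alt (sequence : String) : Int :=
  (List.foldl (bStep (bCut (PySem.List.enumerate sequence.toList)))
    (0, 1) (PySem.List.enumerate sequence.toList)).1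

-- ===== PRECONDITION & SPEC =====
def Spec_calculateOutput (sequence : String) (out : Int) : Prop := out = calculateOutput_alt sequence
instance (sequence : String) (out : Int) : Decidable (Spec_calculateOutput sequence out) := by unfold Spec_calculateOutput; infer_instance

-- ===== CLAIM (what is proved, stated in full; the proofs are below) =====
def Claim_equal_calculateOutput : Prop := ∀ (sequence : String), Dom_calculateOutput sequence → Spec_calculateOutput sequence (calculateOutput sequence)

-- ===== LEMMAS AND PROOFS =====

lemma bStep_snd (cf s v k : Int) (c : Char) :
    (bStep cf (s, v) (k, c)).2 = if c = 'I' then -v else v := by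
  simp only [bStep]; split_ifs <;> rfl

lemma aStep_snd (s v : Int) (c : Char) :
    (aStep (s, v) c).2 = if c = 'I' then -v else v := by
  simp only [aStep]; split_ifs <;> simp_all

lemma bStep_low (cf s v k : Int) (c : Char) (h : ¬ cf ≤ k) :
    bStep cf (s, v) (k, c) = (s, if c = 'I' then -v else v) := by
  simp only [bStep]; split_ifs <;> simp_all

lemma step_eq (cf k s v : Int) (c : Char) (hR : c ≠ 'R') (hk : cf ≤ k) :
    aStep (s, v) c = bStep cf (s, v) (k, c) := by
  simp only [aStep, bStep]
  by_cases h1 : c = '+' <;> by_cases h2 : c = '-' <;> by_cases h3 : c = 'I' <;>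
    simp_all

-- the cutoff after appending one char
lemma bCut_append (l : List Char) (c : Char) :
    bCut (PySem.List.enumerate (l ++ [c]))
      = if c = 'R' then (l.length : Int) + 1 else bCut (PySem.List.enumerate l) := by
  rw [PySem.List.enumerate_append]
  simp [bCut, List.foldl_append, PySem.List.enumerate_cons, PySem.List.enumerate_nil]

-- the cutoff never exceeds the length
lemma bCut_le (l : List Char) : bCut (PySem.List.enumerate l) ≤ (l.length : Int) := by
  induction l using List.reverseRecOn with
  | nil => simp [bCut, PySem.List.enumerate_nil]
  | append_singleton t c ih =>
    rw [bCut_append]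
    simp only [List.length_append, List.length_singleton]
    push_cast
    split_ifs <;> omega

-- the sign-parity component agrees between the two folds, for any cutoff and sums
lemma snd_eq (l : List Char) : ∀ (k s s' v cf : Int),
    (List.foldl (bStep cf) (s', v) (PySem.List.enumerate l k)).2
      = (List.foldl aStep (s, v) l).2 := by
  induction l with
  | nil => intro k s s' v cf; simp [PySem.List.enumerate_nil]
  | cons c t ih =>
    intro k s s' v cf
    rw [PySem.List.enumerate_cons, List.foldl_cons, List.foldl_cons]
    have hb := bStep_snd cf s' v k c
    have ha := aStep_snd s v c
    rcases hB : bStep cf (s', v) (k, c) with ⟨b1, b2⟩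
    rcases hA : aStep (s, v) c with ⟨a1, a2⟩
    rw [hB] at hb; rw [hA] at ha
    simp only at hb ha
    rw [show a2 = b2 from ha.trans hb.symm]
    exact ih (k + 1) a1 b1 b2 cf

-- with a cutoff past every index, B's fold leaves the sum untouched
lemma fst_high (l : List Char) : ∀ (k s v cf : Int), k + (l.length : Int) ≤ cf →
    (List.foldl (bStep cf) (s, v) (PySem.List.enumerate l k)).1 = s := by
  induction l with
  | nil => intro k s v cf _; simp [PySem.List.enumerate_nil]
  | cons c t ih =>
    intro k s v cf h
    rw [PySem.List.enumerate_cons, List.foldl_cons]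
    have hlen : (0:Int) ≤ (t.length : Int) := by positivity
    have hk : ¬ cf ≤ k := by
      simp only [List.length_cons] at h; push_cast at h; omega
    rw [bStep_low cf s v k c hk]
    exact ih (k + 1) s _ cf (by simp only [List.length_cons] at h; push_cast at h ⊢; omega)

lemma key (l : List Char) :
    List.foldl aStep (0, 1) l
      = List.foldl (bStep (bCut (PySem.List.enumerate l))) (0, 1) (PySem.List.enumerate l) := by
  induction l using List.reverseRecOn with
  | nil => simp [PySem.List.enumerate_nil]
  | append_singleton t c ih =>
    rw [List.foldl_append, List.foldl_cons, List.foldl_nil, bCut_append,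
      PySem.List.enumerate_append, List.foldl_append, PySem.List.enumerate_cons,
      PySem.List.enumerate_nil, List.foldl_cons, List.foldl_nil]
    by_cases hR : c = 'R'
    · subst hR
      rw [if_pos rfl]
      have h1 : (List.foldl (bStep ((t.length : Int) + 1)) (0, 1) (PySem.List.enumerate t)).1 = 0 :=
        fst_high t 0 0 1 _ (by omega)
      have h2 : (List.foldl (bStep ((t.length : Int) + 1)) (0, 1) (PySem.List.enumerate t)).2
          = (List.foldl aStep (0, 1) t).2 := snd_eq t 0 0 0 1 _
      rcases hI : List.foldl (bStep ((t.length : Int) + 1)) ((0:Int), (1:Int)) (PySem.List.enumerate t) with ⟨i1, i2⟩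
      rw [hI] at h1 h2
      simp only at h1 h2
      subst h1
      rw [bStep_low _ _ _ _ _ (by omega)]
      subst h2
      simp [aStep]
    · rw [if_neg hR, ← ih]
      rcases hst : List.foldl aStep ((0:Int), (1:Int)) t with ⟨s, v⟩
      exact step_eq _ _ s v c hR (by have := bCut_le t; omega)

-- ===== VERDICT (by name: the statement is the Claim_ definition above) =====
theorem calculateOutput_spec : Claim_equal_calculateOutput := by
  intro s _
  unfold Spec_calculateOutput calculateOutput calculateOutput_alt
  exact congrArg Prod.fst (key s.toList)
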